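-- pv_equiv track=rewrite | github.com/Jiayang225-coding/Monty-Hall-Problem | Monty_hall.py | new_choice
-- ===== SOURCE A (Python) =====
-- def new_choice(mine,host):
--     all_choices = ["A", "B", "C"]
--
--     del_list_1 = []
--     for i in all_choices:
--         if i == host:
--             del_list_1.append(i)
--         if i == mine:
--             del_list_1.append(i)
--
--     for i in del_list_1:
--         if i in all_choices:
--             all_choices.remove(i)
--
--     return all_choices
-- ===== SOURCE B (Python) =====
-- def new_choice(mine, host):
--     return sorted({"A", "B", "C"} - {mine, host})
-- ===== Notes on version B (the rewrite author's own statement) =====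
-- stated objective: idiomatic
-- what changed: Replaces the two loops (building a deletion list, then removing from a mutable list) with a single sorted set difference {'A','B','C'} - {mine, host}.
import Mathlib
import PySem

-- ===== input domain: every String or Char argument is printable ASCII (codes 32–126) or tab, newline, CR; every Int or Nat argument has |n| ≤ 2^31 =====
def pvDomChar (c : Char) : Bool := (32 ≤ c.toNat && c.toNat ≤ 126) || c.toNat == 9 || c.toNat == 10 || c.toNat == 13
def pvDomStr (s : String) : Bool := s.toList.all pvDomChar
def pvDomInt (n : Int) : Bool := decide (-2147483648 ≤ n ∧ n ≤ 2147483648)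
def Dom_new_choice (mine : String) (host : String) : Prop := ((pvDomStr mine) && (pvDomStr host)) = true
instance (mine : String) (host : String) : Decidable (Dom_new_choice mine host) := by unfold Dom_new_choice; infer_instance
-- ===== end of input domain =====

-- B replaces A's two loops (build a deletion list, then remove from a mutable list) with a single sorted set difference; objective: idiomatic.


-- ===== PORT A =====
def new_choice (mine : String) (host : String) : List String :=
  let all_choices : List String := ["A", "B", "C"]
  let del_list_1 : List String :=
    all_choices.foldl (fun acc i =>
      let acc := if i == host then acc ++ [i] else acc
      if i == mine then acc ++ [i] else acc) []
  del_list_1.foldl (fun ac i =>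
    if ac.contains i then (PySem.List.remove? ac i).getD ac else ac) all_choices

-- ===== PORT B =====
def new_choice_alt (mine : String) (host : String) : List String :=
  PySem.List.sorted
    (PySem.Set.diff (PySem.Set.ofList ["A", "B", "C"]) (PySem.Set.ofList [mine, host]))
    (fun x => x) false

-- ===== PRECONDITION & SPEC =====
def Spec_new_choice (mine : String) (host : String) (out : List String) : Prop := out = new_choice_alt mine host
instance (mine : String) (host : String) (out : List String) : Decidable (Spec_new_choice mine host out) := by unfold Spec_new_choice; infer_instance

-- ===== CLAIM (what is proved, stated in full; the proofs are below) =====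
def Claim_equal_new_choice : Prop := ∀ (mine : String) (host : String), Dom_new_choice mine host → Spec_new_choice mine host (new_choice mine host)

-- ===== LEMMAS AND PROOFS =====

-- sorted with the identity key is the identity on an already-ordered list of strings
theorem pv_sortfix (xs : List String) (h : xs.Pairwise (fun a b => a ≤ b)) :
    PySem.List.sorted xs (fun x : String => x) false = xs := by
  have := PySem.List.sorted_eq_self_of_pairwise (xs := xs) (key := fun x : String => x)
  exact this (by simpa using h)

-- the eight ordered sublists of ["A","B","C"] that B's set difference can produce are sorted-stable
theorem pv_s0 : PySem.List.sorted ([] : List String) (fun x => x) false = [] := pv_sortfix _ (by simp)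
theorem pv_s1 : PySem.List.sorted ["A"] (fun x => x) false = ["A"] := pv_sortfix _ (by simp)
theorem pv_s2 : PySem.List.sorted ["B"] (fun x => x) false = ["B"] := pv_sortfix _ (by simp)
theorem pv_s3 : PySem.List.sorted ["C"] (fun x => x) false = ["C"] := pv_sortfix _ (by simp)
theorem pv_s4 : PySem.List.sorted ["A","B"] (fun x => x) false = ["A","B"] := pv_sortfix _ (by simp [List.pairwise_cons] <;> decide)
theorem pv_s5 : PySem.List.sorted ["A","C"] (fun x => x) false = ["A","C"] := pv_sortfix _ (by simp [List.pairwise_cons] <;> decide)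
theorem pv_s6 : PySem.List.sorted ["B","C"] (fun x => x) false = ["B","C"] := pv_sortfix _ (by simp [List.pairwise_cons] <;> decide)
theorem pv_s7 : PySem.List.sorted ["A","B","C"] (fun x => x) false = ["A","B","C"] := pv_sortfix _ (by simp [List.pairwise_cons] <;> decide)

-- both programs are functions of the same seven string comparisons; case on them and evaluate
theorem pv_main (mine host : String) : new_choice mine host = new_choice_alt mine host := by
  cases hA : ("A" == mine) <;> cases hB : ("B" == mine) <;> cases hC : ("C" == mine) <;>
    cases hA' : ("A" == host) <;> cases hB' : ("B" == host) <;> cases hC' : ("C" == host) <;>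
    cases hM : (host == mine) <;>
    first
      | (simp only [new_choice, new_choice_alt, PySem.Set.diff, PySem.Set.ofList, PySem.Set.add,
            PySem.Set.contains, PySem.Set.empty_eq, List.foldl_cons, List.foldl_nil,
            List.contains, List.elem, Bool.false_eq_true, if_false, if_true, eq_self_iff_true,
            List.nil_append, List.append_nil, List.cons_append,
            List.filter, Bool.not_true, Bool.not_false,
            hA, hB, hC, hA', hB', hC', hM]
         simp [hA, hB, hC, hA', hB', hC', hM, pv_s0, pv_s1, pv_s2, pv_s3, pv_s4, pv_s5, pv_s6, pv_s7]
         all_goals decide)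
      | (exfalso
         simp only [beq_iff_eq, beq_eq_false_iff_ne] at hA hB hC hA' hB' hC' hM
         subst_vars
         first
           | exact absurd rfl hA | exact absurd rfl hB | exact absurd rfl hC
           | exact absurd rfl hA' | exact absurd rfl hB' | exact absurd rfl hC'
           | exact absurd rfl hM
           | exact absurd hA (by decide) | exact absurd hB (by decide) | exact absurd hC (by decide)
           | exact absurd hA' (by decide) | exact absurd hB' (by decide) | exact absurd hC' (by decide)
           | exact absurd hM (by decide))

-- ===== VERDICT (by name: the statement is the Claim_ definition above) =====
theorem new_choice_spec : Claim_equal_new_choice := by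
  intro mine host _
  unfold Spec_new_choice
  exact pv_main mine host
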